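-- pv_equiv track=rewrite | github.com/an0mium/aragora | scripts/extract_and_rank_prompts.py | is_system_generated
-- ===== SOURCE A (Python) =====
-- def is_system_generated(text: str) -> bool:
--     """Detect system-generated content (session continuations, compaction, etc.)."""
--     markers = [
--         "This session is being continued from a previous conversation",
--         "Conversation compacted",
--         "✻ Conversation compacted",
--         "Called the Read tool with the following input",
--         "Result of calling the Read tool",
--         "SessionStart:compact hook",
--         "SessionStart hook additional context",
--         "UserPromptSubmit hook success",
--     ]
--     for m in markers:
--         if m in text[:500]:
--             return True
--     return False
-- ===== SOURCE B (Python) =====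
-- _MARKERS = [
--     "This session is being continued from a previous conversation",
--     "Conversation compacted",
--     "\u273b Conversation compacted",
--     "Called the Read tool with the following input",
--     "Result of calling the Read tool",
--     "SessionStart:compact hook",
--     "SessionStart hook additional context",
--     "UserPromptSubmit hook success",
-- ]
--
-- # First-character index: bucket the markers by their first character once,
-- # so the scan makes ONE pass over the window and at each position only
-- # tries the (few) markers that could start there.
-- _INDEX = {}
-- for _m in _MARKERS:
--     _INDEX.setdefault(_m[0], []).append(_m)
--
--
-- def is_system_generated(text: str) -> bool:
--     """Detect system-generated content (session continuations, compaction, etc.)."""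
--     window = text[:500]
--     for i, ch in enumerate(window):
--         for m in _INDEX.get(ch, []):
--             if window.startswith(m, i):
--                 return True
--     return False
-- ===== Notes on version B (the rewrite author's own statement) =====
-- stated objective: alternative
-- what changed: Instead of scanning the 500-char window once per marker, B buckets the markers by first character into a dict built once and makes a single pass over the window positions, trying at each position only the markers whose first character matches.
import Mathlib
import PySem

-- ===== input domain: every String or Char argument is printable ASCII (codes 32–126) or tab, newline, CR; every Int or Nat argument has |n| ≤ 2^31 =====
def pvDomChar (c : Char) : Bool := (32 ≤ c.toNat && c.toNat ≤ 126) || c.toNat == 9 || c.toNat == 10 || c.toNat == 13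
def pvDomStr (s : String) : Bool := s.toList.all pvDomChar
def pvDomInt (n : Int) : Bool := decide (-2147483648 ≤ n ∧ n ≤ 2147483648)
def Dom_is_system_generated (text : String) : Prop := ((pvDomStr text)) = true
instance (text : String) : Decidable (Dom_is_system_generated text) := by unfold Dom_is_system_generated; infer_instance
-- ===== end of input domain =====

-- B buckets the markers by first character (a dict built once) and makes a single pass over text[:500], at each position trying only the markers whose first character matches there (alternative traversal; same cost class).


-- ===== PORT A =====
def pvMarkers : List String :=
  [ "This session is being continued from a previous conversation"
  , "Conversation compacted"
  , "✻ Conversation compacted"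
  , "Called the Read tool with the following input"
  , "Result of calling the Read tool"
  , "SessionStart:compact hook"
  , "SessionStart hook additional context"
  , "UserPromptSubmit hook success" ]

-- the 'for m in markers: if m in text[:500]: return True' loop
def pvALoop (window : String) : List String → Bool
  | [] => false
  | m :: rest => if PySem.Str.isIn m window then true else pvALoop window rest

def is_system_generated (text : String) : Bool :=
  pvALoop (PySem.Str.slice text none (some 500)) pvMarkers

-- ===== PORT B =====
-- Source B's module-level index build: for m in _MARKERS: _INDEX.setdefault(m[0], []).append(m)
def pvIdx : PySem.Dict Char (List String) :=
  pvMarkers.foldl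
    (fun d m =>
      let c := m.toList.headD ' '          -- m[0]; every marker is nonempty
      PySem.Dict.insert d c (PySem.Dict.getD d c [] ++ [m]))
    PySem.Dict.empty

-- Source B's scan: for i, ch in enumerate(window): for m in _INDEX.get(ch, []): if window.startswith(m, i): return True
-- (window.startswith(m, i) with 0 ≤ i is exactly 'm.toList is a prefix of the window's chars dropped by i')
def is_system_generated_alt (text : String) : Bool :=
  let w := (PySem.Str.slice text none (some 500)).toList
  (PySem.List.enumerate w 0).any (fun p =>
    (PySem.Dict.getD pvIdx p.2 []).any (fun m =>
      PySem.Chars.startswith (w.drop p.1.toNat) m.toList))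

-- ===== PRECONDITION & SPEC =====
def Spec_is_system_generated (text : String) (out : Bool) : Prop := out = is_system_generated_alt text
instance (text : String) (out : Bool) : Decidable (Spec_is_system_generated text out) := by unfold Spec_is_system_generated; infer_instance

-- ===== CLAIM (what is proved, stated in full; the proofs are below) =====
def Claim_equal_is_system_generated : Prop := ∀ (text : String), Dom_is_system_generated text → Spec_is_system_generated text (is_system_generated text)

-- ===== LEMMAS AND PROOFS =====

-- A's loop is an 'any' over the marker list
theorem pvALoop_eq_any (window : String) (ms : List String) :
    pvALoop window ms = ms.any (fun m => PySem.Str.isIn m window) := by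
  induction ms with
  | nil => rfl
  | cons m rest ih => cases h : PySem.Str.isIn m window <;> simp [pvALoop, h, ih]

-- the built index is exactly 'bucket c = the markers whose first character is c'
theorem pvIdx_getD (c : Char) :
    PySem.Dict.getD pvIdx c [] = pvMarkers.filter (fun m => m.toList.head? == some c) := by
  by_cases h1 : c = 'T'; · subst h1; decide
  by_cases h2 : c = 'C'; · subst h2; decide
  by_cases h3 : c = '✻'; · subst h3; decide
  by_cases h4 : c = 'R'; · subst h4; decide
  by_cases h5 : c = 'S'; · subst h5; decide
  by_cases h6 : c = 'U'; · subst h6; decide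
  rw [show pvIdx = PySem.Dict.mk
    [ ('T', ["This session is being continued from a previous conversation"])
    , ('C', ["Conversation compacted", "Called the Read tool with the following input"])
    , ('✻', ["✻ Conversation compacted"])
    , ('R', ["Result of calling the Read tool"])
    , ('S', ["SessionStart:compact hook", "SessionStart hook additional context"])
    , ('U', ["UserPromptSubmit hook success"]) ] from by decide]
  simp [PySem.Dict.getD_eq_get?_getD, pvMarkers,
    Ne.symm h1, Ne.symm h2, Ne.symm h3, Ne.symm h4, Ne.symm h5, Ne.symm h6, PySem.Dict.get?]

theorem pv_marker_ne_nil : ∀ m ∈ pvMarkers, m.toList ≠ [] := by decide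

-- the two 'any's agree: A's per-marker window scan vs B's per-position first-char dispatch
theorem pv_any_eq (text : String) :
    (pvMarkers.any (fun m => PySem.Str.isIn m (PySem.Str.slice text none (some 500))))
    = (PySem.List.enumerate (PySem.Str.slice text none (some 500)).toList 0).any (fun p =>
        (PySem.Dict.getD pvIdx p.2 []).any (fun m =>
          PySem.Chars.startswith ((PySem.Str.slice text none (some 500)).toList.drop p.1.toNat) m.toList)) := by
  set w := (PySem.Str.slice text none (some 500)).toList with hw
  rw [Bool.eq_iff_iff, List.any_eq_true, List.any_eq_true]
  constructor
  · rintro ⟨m, hm, hin⟩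
    simp only [PySem.Str.isIn_eq, ← hw] at hin
    rw [← PySem.Chars.exists_prefix_drop_iff_isIn] at hin
    obtain ⟨j, hpre⟩ := hin
    cases hmt : m.toList with
    | nil => exact absurd hmt (pv_marker_ne_nil m hm)
    | cons d rest =>
      rw [hmt] at hpre
      have hjlt : j < w.length := by
        by_contra hge
        have : w.drop j = [] := List.drop_eq_nil_of_le (by omega)
        rw [this] at hpre
        exact absurd (List.prefix_nil.mp hpre) (by simp)
      have hhead : (w.drop j).head? = some d := by
        rcases hpre with ⟨t, ht⟩; rw [← ht]; rfl
      have hwj : w[j]? = some d := by rw [← List.head?_drop]; exact hhead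
      refine ⟨((j : Int), w[j]), ?_, ?_⟩
      · rw [PySem.List.mem_enumerate_iff]; exact ⟨j, hjlt, by simp⟩
      · rw [List.any_eq_true]
        refine ⟨m, ?_, ?_⟩
        · rw [pvIdx_getD, List.mem_filter]
          have : w[j] = d := by
            have := List.getElem?_eq_getElem (l := w) (i := j) hjlt
            rw [this] at hwj; exact Option.some_inj.mp hwj
          exact ⟨hm, by simp [hmt, this]⟩
        · have : ((j : Int)).toNat = j := by simp
          rw [this, hmt]
          exact (PySem.Chars.startswith_iff _ _).mpr hpre
  · rintro ⟨p, hp, hany⟩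
    rw [PySem.List.mem_enumerate_iff] at hp
    obtain ⟨k, hk, hpk⟩ := hp
    rw [List.any_eq_true] at hany
    obtain ⟨m, hmb, hsw⟩ := hany
    rw [pvIdx_getD, List.mem_filter] at hmb
    refine ⟨m, hmb.1, ?_⟩
    simp only [PySem.Str.isIn_eq, ← hw]
    rw [← PySem.Chars.exists_prefix_drop_iff_isIn]
    exact ⟨p.1.toNat, (PySem.Chars.startswith_iff _ _).mp hsw⟩

theorem pv_equal (text : String) :
    is_system_generated text = is_system_generated_alt text := by
  unfold is_system_generated is_system_generated_alt
  rw [pvALoop_eq_any]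
  exact pv_any_eq text

-- ===== VERDICT (by name: the statement is the Claim_ definition above) =====
theorem is_system_generated_spec : Claim_equal_is_system_generated := by
  intro text _
  unfold Spec_is_system_generated
  exact pv_equal text
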